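-- pv_equiv track=rewrite | github.com/binalfew/free-text-annotation | stanford_nlp/corenlp_wrapper.py | _identify_noun_phrases
-- ===== SOURCE A (Python) =====
-- from typing import Dict, List, Optional
--
-- def _identify_noun_phrases(tokens: List[Dict]) -> Dict[int, int]:
--     """Identify noun phrases and return mapping of modifier -> head."""
--     mapping = {}
--     i = 0
--     while i < len(tokens):
--         if tokens[i]['pos'] in ['NN', 'NNS', 'NNP', 'NNPS']:
--             # Found a noun, check if followed by another noun
--             if i + 1 < len(tokens) and tokens[i + 1]['pos'] in ['NN', 'NNS', 'NNP', 'NNPS']: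
--                 # Compound: first noun modifies second
--                 mapping[i] = i + 1
--                 i += 1
--             else:
--                 i += 1
--         else:
--             i += 1
--     return mapping
-- ===== SOURCE B (Python) =====
-- def _identify_noun_phrases(tokens):
--     """Identify noun phrases and return mapping of modifier -> head."""
--     NOUN_TAGS = ('NN', 'NNS', 'NNP', 'NNPS')
--     flags = [t['pos'] in NOUN_TAGS for t in tokens]
--     mapping = {}
--     start = None
--     for i, is_noun in enumerate(flags):
--         if is_noun:
--             if start is None:
--                 start = i
--         elif start is not None:
--             for j in range(start, i - 1):
--                 mapping[j] = j + 1
--             start = None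
--     if start is not None:
--         for j in range(start, len(tokens) - 1):
--             mapping[j] = j + 1
--     return mapping
-- ===== Notes on version B (the rewrite author's own statement) =====
-- stated objective: alternative
-- what changed: B first computes the noun-tag flag list, then groups maximal runs of consecutive nouns with a start/close state machine and emits mapping[j]=j+1 for every run member except the last in a bulk range pass, instead of A's per-index lookahead scan.
import Mathlib
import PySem

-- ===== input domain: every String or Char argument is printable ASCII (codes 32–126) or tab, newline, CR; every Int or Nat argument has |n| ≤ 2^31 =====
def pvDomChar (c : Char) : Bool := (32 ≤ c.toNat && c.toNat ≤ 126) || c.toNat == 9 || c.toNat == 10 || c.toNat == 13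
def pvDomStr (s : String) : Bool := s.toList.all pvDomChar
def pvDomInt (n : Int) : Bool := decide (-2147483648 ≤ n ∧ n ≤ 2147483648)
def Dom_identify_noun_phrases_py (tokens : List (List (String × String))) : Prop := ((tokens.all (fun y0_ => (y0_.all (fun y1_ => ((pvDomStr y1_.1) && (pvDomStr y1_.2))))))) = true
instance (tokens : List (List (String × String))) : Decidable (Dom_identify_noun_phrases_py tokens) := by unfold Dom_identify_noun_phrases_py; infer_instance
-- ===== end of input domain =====

-- B groups maximal runs of consecutive noun-tagged tokens first and then emits modifier->head
-- pairs per run, instead of A's per-index lookahead scan; alternative decomposition, same O(n) cost.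

-- shared helper: the Python expression  t['pos'] in ['NN', 'NNS', 'NNP', 'NNPS']
-- (a missing 'pos' key is a KeyError in Python: excluded by Pre_; the port returns false there)
def pvIsNoun (t : List (String × String)) : Bool :=
  match (PySem.Dict.mk t).get? "pos" with
  | some p => p == "NN" || p == "NNS" || p == "NNP" || p == "NNPS"
  | none => false

-- ===== PORT A =====
-- the while loop: index i, dict `mapping`
def pvALoop (tokens : List (List (String × String))) (i : Nat) (m : PySem.Dict Int Int) :
    PySem.Dict Int Int :=
  if h : i < tokens.length then
    if pvIsNoun tokens[i] then
      if h2 : i + 1 < tokens.length then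
        if pvIsNoun tokens[i + 1] then
          pvALoop tokens (i + 1) (m.insert (i : Int) ((i : Int) + 1))
        else pvALoop tokens (i + 1) m
      else pvALoop tokens (i + 1) m
    else pvALoop tokens (i + 1) m
  else m
termination_by tokens.length - i

def identify_noun_phrases_py (tokens : List (List (String × String))) : List (Int × Int) :=
  (pvALoop tokens 0 PySem.Dict.empty).items

-- ===== PORT B =====
-- mapping[j] = j + 1 for j in range(s, e)
def pvEmitRun (m : PySem.Dict Int Int) (s e : Int) : PySem.Dict Int Int :=
  (PySem.List.pyRange s e 1).foldl (fun m j => m.insert j (j + 1)) m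

-- the `for i, is_noun in enumerate(flags)` loop, state (start, mapping)
def pvBLoop (flags : List Bool) (i : Int) (start : Option Int) (m : PySem.Dict Int Int) :
    Option Int × PySem.Dict Int Int :=
  match flags with
  | [] => (start, m)
  | f :: fs =>
    if f then
      pvBLoop fs (i + 1) (if start.isNone then some i else start) m
    else
      match start with
      | some s => pvBLoop fs (i + 1) none (pvEmitRun m s (i - 1))
      | none => pvBLoop fs (i + 1) none m

def identify_noun_phrases_py_alt (tokens : List (List (String × String))) : List (Int × Int) :=
  let flags := tokens.map pvIsNoun
  let r := pvBLoop flags 0 none PySem.Dict.empty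
  (match r.1 with
   | some s => pvEmitRun r.2 s ((tokens.length : Int) - 1)
   | none => r.2).items

-- ===== PRECONDITION & SPEC =====
-- Pre_ excludes exactly the inputs where Python A raises KeyError: a token dict without a 'pos' key.
def Pre_identify_noun_phrases_py (tokens : List (List (String × String))) : Prop :=
  ∀ t ∈ tokens, ((PySem.Dict.mk t).get? "pos").isSome
instance (tokens : List (List (String × String))) : Decidable (Pre_identify_noun_phrases_py tokens) := by
  unfold Pre_identify_noun_phrases_py; infer_instance

def pvWitness_identify_noun_phrases_py : (List (List (String × String))) :=
  [[("pos", "NN")], [("pos", "NNS")], [("pos", "VB")], [("pos", "NNP")]]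

def Spec_identify_noun_phrases_py (tokens : List (List (String × String))) (out : List (Int × Int)) : Prop := out = identify_noun_phrases_py_alt tokens
instance (tokens : List (List (String × String))) (out : List (Int × Int)) : Decidable (Spec_identify_noun_phrases_py tokens out) := by unfold Spec_identify_noun_phrases_py; infer_instance

-- ===== CLAIM (what is proved, stated in full; the proofs are below) =====
def Claim_equal_identify_noun_phrases_py : Prop := ∀ (tokens : List (List (String × String))), Dom_identify_noun_phrases_py tokens → Pre_identify_noun_phrases_py tokens → Spec_identify_noun_phrases_py tokens (identify_noun_phrases_py tokens)

-- ===== LEMMAS AND PROOFS =====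

-- canonical result: one pair (i, i+1) for each index whose flag and successor flag are both true
def pvC : List Bool → Int → List (Int × Int)
  | [], _ => []
  | f :: fs, i => (if f && fs.headD false then [(i, i + 1)] else []) ++ pvC fs (i + 1)

-- pairs (j, j+1) for j ∈ [s, e)
def pvR (s e : Int) : List (Int × Int) :=
  (PySem.List.pyRange s e 1).map (fun j => (j, j + 1))

-- B's final step (the trailing `if start is not None` emit), as used by identify_noun_phrases_py_alt
def pvFinish (r : Option Int × PySem.Dict Int Int) (e : Int) : List (Int × Int) :=
  (match r.1 with
   | some s => pvEmitRun r.2 s e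
   | none => r.2).items

theorem pvEmitRun_items (m : PySem.Dict Int Int) (s e : Int)
    (hk : ∀ k ∈ m.keys, k < s) :
    (pvEmitRun m s e).items = m.items ++ pvR s e := by
  unfold pvEmitRun pvR
  rw [PySem.Dict.items_foldl_insert_fresh]
  · intro a ha
    rw [PySem.Dict.contains_eq_decide_mem_keys]
    simp only [decide_eq_false_iff_not]
    intro hmem
    have := hk a hmem
    have := (PySem.List.mem_pyRange_one.mp ha).1
    omega
  · simpa using PySem.List.nodup_pyRange_one s e

theorem pvEmitRun_keys (m : PySem.Dict Int Int) (s e : Int)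
    (hk : ∀ k ∈ m.keys, k < s) :
    (pvEmitRun m s e).keys = m.keys ++ PySem.List.pyRange s e 1 := by
  have h := pvEmitRun_items m s e hk
  simp only [PySem.Dict.keys, h, List.map_append, pvR, List.map_map]
  simp [Function.comp_def]

theorem pvHeadD_drop (tokens : List (List (String × String))) (j : Nat) :
    ((tokens.map pvIsNoun).drop j).headD false
      = if h : j < tokens.length then pvIsNoun tokens[j] else false := by
  split
  · next h =>
    rw [List.drop_eq_getElem_cons (by simpa using h)]
    simp
  · next h => rw [List.drop_eq_nil_of_le (by simpa using Nat.le_of_not_lt h)]; rfl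

theorem pvALoop_items (tokens : List (List (String × String))) :
    ∀ (n i : Nat) (m : PySem.Dict Int Int), tokens.length ≤ i + n →
      (∀ k ∈ m.keys, k < (i : Int)) → m.keys.Nodup →
      (pvALoop tokens i m).items = m.items ++ pvC ((tokens.map pvIsNoun).drop i) i := by
  intro n
  induction n with
  | zero =>
    intro i m hlen hk hnd
    rw [pvALoop, dif_neg (by omega), List.drop_eq_nil_of_le (by simpa using hlen)]
    simp [pvC]
  | succ n ih =>
    intro i m hlen hk hnd
    by_cases h : i < tokens.length
    · have hdrop : (tokens.map pvIsNoun).drop i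
          = pvIsNoun tokens[i] :: (tokens.map pvIsNoun).drop (i + 1) := by
        rw [List.drop_eq_getElem_cons (by simpa using h)]
        simp
    
      rw [pvALoop, dif_pos h, hdrop]
      by_cases hf : pvIsNoun tokens[i]
      · rw [if_pos hf]
        by_cases h2 : i + 1 < tokens.length
        · rw [dif_pos h2]
          by_cases hf2 : pvIsNoun tokens[i + 1]
          · rw [if_pos hf2]
            have hnc : m.contains (i : Int) = false := by
              rw [PySem.Dict.contains_eq_decide_mem_keys]
              simp only [decide_eq_false_iff_not]
              intro hmem; have := hk _ hmem; omega
            have hkeys : (m.insert (i : Int) ((i : Int) + 1)).keys = m.keys ++ [(i : Int)] :=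
              PySem.Dict.keys_insert_of_not_contains _ _ hnc
            rw [ih (i + 1) _ (by omega)
                (by rw [hkeys]; intro k hkk; simp at hkk
                    rcases hkk with hkk | hkk
                    · have := hk _ hkk; push_cast; omega
                    · subst hkk; push_cast; omega)
                (by rw [hkeys]
                    refine List.Nodup.append hnd (List.nodup_singleton _) ?_
                    intro a ha hb; simp at hb; subst hb
                    have := hk _ ha; omega)]
            rw [PySem.Dict.items_insert_of_not_contains _ _ hnc]
            rw [pvC, pvHeadD_drop, dif_pos h2, if_pos (by simp [hf, hf2])]
            push_cast
            simp
          · rw [if_neg hf2]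
            rw [ih (i + 1) m (by omega) (fun k hkk => by have := hk _ hkk; push_cast; omega) hnd]
            rw [pvC, pvHeadD_drop, dif_pos h2, if_neg (by simp [hf2])]
            push_cast
            simp
        · rw [dif_neg h2]
          rw [ih (i + 1) m (by omega) (fun k hkk => by have := hk _ hkk; push_cast; omega) hnd]
          rw [pvC, pvHeadD_drop, dif_neg h2, if_neg (by simp)]
          push_cast
          simp
      · rw [if_neg hf]
        rw [ih (i + 1) m (by omega) (fun k hkk => by have := hk _ hkk; push_cast; omega) hnd]
        rw [pvC, if_neg (by simp [hf])]
        push_cast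
        simp
    · rw [pvALoop, dif_neg h, List.drop_eq_nil_of_le (by simp; omega)]
      simp [pvC]

theorem pvR_succ (s e : Int) (h : s ≤ e) :
    pvR s (e + 1) = pvR s e ++ [(e, e + 1)] := by
  simp [pvR, PySem.List.pyRange_one_succ_right h]

theorem pvBLoop_items :
    ∀ (fs : List Bool) (i : Int) (m : PySem.Dict Int Int),
      m.keys.Nodup →
      ((∀ k ∈ m.keys, k < i) →
        pvFinish (pvBLoop fs i none m) (i + fs.length - 1) = m.items ++ pvC fs i) ∧
      (∀ s : Int, s < i → (∀ k ∈ m.keys, k < s) →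
        pvFinish (pvBLoop fs i (some s) m) (i + fs.length - 1)
          = m.items ++ pvR s (i - 1) ++ pvC (true :: fs) (i - 1)) := by
  intro fs
  induction fs with
  | nil =>
    intro i m hnd
    constructor
    · intro hk
      simp [pvBLoop, pvFinish, pvC]
    · intro s hs hk
      simp only [pvBLoop, pvFinish, List.length_nil]
      rw [show i + ((0:Nat):Int) - 1 = i - 1 by push_cast; ring]
      rw [pvEmitRun_items m s (i - 1) hk]
      simp [pvC]
  | cons f fs ih =>
    intro i m hnd
    have hlen : ∀ j : Int, j + ((f :: fs).length : Int) - 1 = (j + 1) + (fs.length : Int) - 1 := by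
      intro j; simp; omega
    constructor
    · intro hk
      rw [hlen]
      by_cases hf : f
      · subst hf
        simp only [pvBLoop, Option.isNone_none, if_true]
        have h2 := ((ih (i + 1) m hnd).2) i (by omega) hk
        rw [h2]
        rw [show i + 1 - 1 = i by ring]
        rw [show pvR i i = [] by simp [pvR, PySem.List.pyRange_one_eq_nil (le_refl i)]]
        simp
      · simp only [Bool.not_eq_true] at hf
        subst hf
        simp only [pvBLoop, Bool.false_eq_true, if_false]
        have h1 := ((ih (i + 1) m hnd).1) (fun k hkk => by have := hk _ hkk; omega)
        rw [h1]
        simp [pvC]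
    · intro s hs hk
      rw [hlen]
      by_cases hf : f
      · subst hf
        simp only [pvBLoop, Option.isNone_some, Bool.false_eq_true, if_false, if_true]
        have h2 := ((ih (i + 1) m hnd).2) s (by omega) hk
        rw [h2]
        rw [show i + 1 - 1 = i by ring]
        have hR : pvR s i = pvR s (i - 1) ++ [(i - 1, (i - 1) + 1)] := by
          rw [← pvR_succ s (i - 1) (by omega), show i - 1 + 1 = i by ring]
        rw [hR]
        have hC : pvC (true :: true :: fs) (i - 1)
            = [(i - 1, (i - 1) + 1)] ++ pvC (true :: fs) (i - 1 + 1) := by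
          simp [pvC]
        rw [hC, show i - 1 + 1 = i by ring]
        simp
      · simp only [Bool.not_eq_true] at hf
        subst hf
        simp only [pvBLoop, Bool.false_eq_true, if_false]
        have hkeys : (pvEmitRun m s (i - 1)).keys = m.keys ++ PySem.List.pyRange s (i - 1) 1 :=
          pvEmitRun_keys m s (i - 1) hk
        have hnd2 : (pvEmitRun m s (i - 1)).keys.Nodup := by
          rw [hkeys]
          refine List.Nodup.append hnd (by simpa using PySem.List.nodup_pyRange_one s (i - 1)) ?_
          intro a ha hb
          have := hk _ ha
          have := (PySem.List.mem_pyRange_one.mp hb).1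
          omega
        have hk2 : ∀ k ∈ (pvEmitRun m s (i - 1)).keys, k < i + 1 := by
          rw [hkeys]
          intro k hkk
          rcases List.mem_append.mp hkk with hkk | hkk
          · have := hk _ hkk; omega
          · have := (PySem.List.mem_pyRange_one.mp hkk).2; omega
        have h1 := ((ih (i + 1) (pvEmitRun m s (i - 1)) hnd2).1) hk2
        rw [h1, pvEmitRun_items m s (i - 1) hk]
        have hC : pvC (true :: false :: fs) (i - 1) = pvC fs (i - 1 + 1 + 1) := by
          simp [pvC]
        rw [hC, show i - 1 + 1 + 1 = i + 1 by ring]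

-- ===== VERDICT (by name: the statement is the Claim_ definition above) =====
theorem identify_noun_phrases_py_spec : Claim_equal_identify_noun_phrases_py := by
  intro tokens _ _
  unfold Spec_identify_noun_phrases_py identify_noun_phrases_py identify_noun_phrases_py_alt
  rw [pvALoop_items tokens tokens.length 0 PySem.Dict.empty (by omega)
      (by simp [PySem.Dict.keys_empty]) (by simp [PySem.Dict.keys_empty])]
  have hB := ((pvBLoop_items (tokens.map pvIsNoun) 0 PySem.Dict.empty
      (by simp [PySem.Dict.keys_empty])).1) (by simp [PySem.Dict.keys_empty])
  unfold pvFinish at hB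
  simp only [List.length_map] at hB
  rw [show ((tokens.length : Int) - 1) = 0 + (tokens.length : Int) - 1 by ring]
  rw [hB]
  simp
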